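-- pv_equiv track=rewrite | github.com/shankho9/AdvantOfCode2025 | 12Dec/Prob1/prob_day12.py | placements_for_shape
-- ===== SOURCE A (Python) =====
-- def placements_for_shape(shape, w, h):
--     """Return list of placements: each is set of cell indices."""
--     out = []
--     maxx = max(x for x, y in shape)
--     maxy = max(y for x, y in shape)
--     for ox in range(w - maxx):
--         for oy in range(h - maxy):
--             cells = []
--             ok = True
--             for x, y in shape:
--                 gx = ox + x
--                 gy = oy + y
--                 if gx < 0 or gx >= w or gy < 0 or gy >= h:
--                     ok = False
--                     break
--                 cells.append(gy * w + gx)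
--             if ok:
--                 out.append(frozenset(cells))
--     return out
-- ===== SOURCE B (Python) =====
-- def placements_for_shape(shape, w, h):
--     """Return list of placements: each is set of cell indices."""
--     xs = [x for x, y in shape]
--     ys = [y for x, y in shape]
--     minx, maxx = min(xs), max(xs)
--     miny, maxy = min(ys), max(ys)
--     pattern = [y * w + x for x, y in shape]
--     out = []
--     for ox in range(max(0, -minx), w - maxx):
--         for oy in range(max(0, -miny), h - maxy):
--             base = oy * w + ox
--             out.append(frozenset(base + p for p in pattern))
--     return out
-- ===== Notes on version B (the rewrite author's own statement) =====
-- stated objective: alternative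
-- what changed: B precomputes the shape's bounding box and a flat offset pattern once, then enumerates the rectangle of valid offsets directly and emits each placement with plain arithmetic, eliminating A's per-cell bounds check and early-exit inner loop.
import Mathlib
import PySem

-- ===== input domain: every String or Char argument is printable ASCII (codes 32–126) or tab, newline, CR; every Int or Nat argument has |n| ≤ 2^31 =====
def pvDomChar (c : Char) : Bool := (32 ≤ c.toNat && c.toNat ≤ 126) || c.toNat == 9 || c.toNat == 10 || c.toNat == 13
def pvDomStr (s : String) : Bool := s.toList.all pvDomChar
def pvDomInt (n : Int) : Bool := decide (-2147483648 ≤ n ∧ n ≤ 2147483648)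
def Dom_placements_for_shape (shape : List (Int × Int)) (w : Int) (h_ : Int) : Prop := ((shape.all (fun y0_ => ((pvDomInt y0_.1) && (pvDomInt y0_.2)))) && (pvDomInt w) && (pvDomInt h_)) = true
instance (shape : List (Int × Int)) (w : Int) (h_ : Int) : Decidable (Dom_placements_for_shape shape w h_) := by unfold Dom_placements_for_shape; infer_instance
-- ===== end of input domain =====

-- B precomputes the bounding box and a flat offset pattern once and enumerates the rectangle
-- of valid offsets directly, removing A's per-cell bounds check (objective: alternative).


-- ===== PORT A =====
-- the inner 'for x, y in shape' loop with its break: some cells iff every cell is in bounds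
def pvCellsA (ox oy w h_ : Int) : List (Int × Int) → List Int → Option (List Int)
  | [], acc => some acc
  | (x, y) :: rest, acc =>
    let gx := ox + x
    let gy := oy + y
    if gx < 0 ∨ gx ≥ w ∨ gy < 0 ∨ gy ≥ h_ then none
    else pvCellsA ox oy w h_ rest (acc ++ [gy * w + gx])

def placements_for_shape (shape : List (Int × Int)) (w : Int) (h_ : Int) : List (List Int) :=
  match PySem.List.max? (shape.map (·.1)) (fun v => v),
        PySem.List.max? (shape.map (·.2)) (fun v => v) with
  | some maxx, some maxy =>
      (PySem.List.pyRange 0 (w - maxx) 1).foldl (fun out ox =>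
        (PySem.List.pyRange 0 (h_ - maxy) 1).foldl (fun out oy =>
          match pvCellsA ox oy w h_ shape [] with
          | some cells => out ++ [PySem.Set.ofList cells]
          | none => out) out) []
  | _, _ => []   -- unreached under Pre_: Python raises ValueError on an empty shape

-- ===== PORT B =====
def placements_for_shape_alt (shape : List (Int × Int)) (w : Int) (h_ : Int) : List (List Int) :=
  let xs := shape.map (·.1)
  let ys := shape.map (·.2)
  match PySem.List.min? xs (fun v => v) with
  | none => []   -- unreached under Pre_: Python raises ValueError on an empty shape
  | some minx =>
    match PySem.List.max? xs (fun v => v) with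
    | none => []
    | some maxx =>
      match PySem.List.min? ys (fun v => v) with
      | none => []
      | some miny =>
        match PySem.List.max? ys (fun v => v) with
        | none => []
        | some maxy =>
          let pattern := shape.map (fun p => p.2 * w + p.1)
          (PySem.List.pyRange (max 0 (-minx)) (w - maxx) 1).foldl (fun out ox =>
            (PySem.List.pyRange (max 0 (-miny)) (h_ - maxy) 1).foldl (fun out oy =>
              out ++ [PySem.Set.ofList (pattern.map (fun p => oy * w + ox + p))]) out) []

-- ===== PRECONDITION & SPEC =====
-- Pre_ excludes only the empty shape, on which Python's max() (and B's min()) raises ValueError.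
def Pre_placements_for_shape (shape : List (Int × Int)) (w : Int) (h_ : Int) : Prop := shape ≠ []
instance (shape : List (Int × Int)) (w : Int) (h_ : Int) : Decidable (Pre_placements_for_shape shape w h_) := by unfold Pre_placements_for_shape; infer_instance
def pvWitness_placements_for_shape : (List (Int × Int)) × Int × Int := ([(0, 0), (1, 0)], 3, 2)

def Spec_placements_for_shape (shape : List (Int × Int)) (w : Int) (h_ : Int) (out : List (List Int)) : Prop := out = placements_for_shape_alt shape w h_
instance (shape : List (Int × Int)) (w : Int) (h_ : Int) (out : List (List Int)) : Decidable (Spec_placements_for_shape shape w h_ out) := by unfold Spec_placements_for_shape; infer_instance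

-- ===== CLAIM (what is proved, stated in full; the proofs are below) =====
def Claim_equal_placements_for_shape : Prop := ∀ (shape : List (Int × Int)) (w : Int) (h_ : Int), Dom_placements_for_shape shape w h_ → Pre_placements_for_shape shape w h_ → Spec_placements_for_shape shape w h_ (placements_for_shape shape w h_)

-- ===== LEMMAS AND PROOFS =====

-- the cell produced by A for shape point p at offset (ox, oy)
def pvCell (ox oy w : Int) (p : Int × Int) : Int := (oy + p.2) * w + (ox + p.1)

-- "every cell of the shape is in bounds at offset (ox, oy)"
def pvOK (ox oy w h_ : Int) (shape : List (Int × Int)) : Bool :=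
  shape.all (fun p => !(decide (ox + p.1 < 0 ∨ ox + p.1 ≥ w ∨ oy + p.2 < 0 ∨ oy + p.2 ≥ h_)))

theorem pvCellsA_eq (ox oy w h_ : Int) (shape : List (Int × Int)) (acc : List Int) :
    pvCellsA ox oy w h_ shape acc =
      if pvOK ox oy w h_ shape then some (acc ++ shape.map (pvCell ox oy w)) else none := by
  induction shape generalizing acc with
  | nil => simp [pvCellsA, pvOK]
  | cons p rest ih =>
    obtain ⟨x, y⟩ := p
    by_cases hb : ox + x < 0 ∨ ox + x ≥ w ∨ oy + y < 0 ∨ oy + y ≥ h_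
    · simp [pvCellsA, pvOK, hb]
    · simp only [pvCellsA, pvOK, List.all_cons, hb, decide_false, Bool.not_false,
        Bool.true_and, if_false, if_neg hb]
      rw [ih]
      simp [pvOK, pvCell, List.append_assoc]

theorem pvOK_iff (shape : List (Int × Int)) (w h_ minx maxx miny maxy ox oy : Int)
    (hminx : PySem.List.min? (shape.map (·.1)) (fun v => v) = some minx)
    (hmaxx : PySem.List.max? (shape.map (·.1)) (fun v => v) = some maxx)
    (hminy : PySem.List.min? (shape.map (·.2)) (fun v => v) = some miny)
    (hmaxy : PySem.List.max? (shape.map (·.2)) (fun v => v) = some maxy)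
    (hox : ox < w - maxx) (hoy : oy < h_ - maxy) :
    pvOK ox oy w h_ shape = (decide (-minx ≤ ox) && decide (-miny ≤ oy)) := by
  have hlox : ∀ p ∈ shape, minx ≤ p.1 := fun p hp =>
    PySem.List.min?_isMin hminx p.1 (List.mem_map.mpr ⟨p, hp, rfl⟩)
  have hhix : ∀ p ∈ shape, p.1 ≤ maxx := fun p hp =>
    PySem.List.max?_isMax hmaxx p.1 (List.mem_map.mpr ⟨p, hp, rfl⟩)
  have hloy : ∀ p ∈ shape, miny ≤ p.2 := fun p hp =>
    PySem.List.min?_isMin hminy p.2 (List.mem_map.mpr ⟨p, hp, rfl⟩)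
  have hhiy : ∀ p ∈ shape, p.2 ≤ maxy := fun p hp =>
    PySem.List.max?_isMax hmaxy p.2 (List.mem_map.mpr ⟨p, hp, rfl⟩)
  obtain ⟨px, hpxmem, hpx⟩ := List.mem_map.mp (PySem.List.min?_mem hminx)
  obtain ⟨py, hpymem, hpy⟩ := List.mem_map.mp (PySem.List.min?_mem hminy)
  have key : (pvOK ox oy w h_ shape = true) ↔ (-minx ≤ ox ∧ -miny ≤ oy) := by
    simp only [pvOK, List.all_eq_true, Bool.not_eq_true', decide_eq_false_iff_not, not_or,
      not_lt, ge_iff_le, not_le]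
    constructor
    · intro hall
      have h1 := hall px hpxmem
      have h2 := hall py hpymem
      omega
    · rintro ⟨h1, h2⟩ p hp
      have := hlox p hp
      have := hhix p hp
      have := hloy p hp
      have := hhiy p hp
      refine ⟨by omega, by omega, by omega, by omega⟩
  rw [Bool.eq_iff_iff, key]
  simp

theorem pvFilter_pyRange (a b lo : Int) (h : a ≤ lo) :
    (PySem.List.pyRange a b 1).filter (fun t => decide (lo ≤ t)) = PySem.List.pyRange lo b 1 := by
  by_cases hb : b ≤ lo
  · rw [PySem.List.pyRange_one_eq_nil hb, List.filter_eq_nil_iff.mpr]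
    intro t ht
    have hm := (PySem.List.mem_pyRange_one).mp ht
    simp only [decide_eq_true_eq]
    omega
  · rw [not_le] at hb
    rw [PySem.List.pyRange_one_append a lo b h (le_of_lt hb), List.filter_append]
    have h1 : (PySem.List.pyRange a lo 1).filter (fun t => decide (lo ≤ t)) = [] := by
      apply List.filter_eq_nil_iff.mpr
      intro t ht
      have hm := (PySem.List.mem_pyRange_one).mp ht
      simp only [decide_eq_true_eq]
      omega
    have h2 : (PySem.List.pyRange lo b 1).filter (fun t => decide (lo ≤ t)) =
        PySem.List.pyRange lo b 1 := by
      apply List.filter_eq_self.mpr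
      intro t ht
      have hm := (PySem.List.mem_pyRange_one).mp ht
      simp only [decide_eq_true_eq]
      omega
    rw [h1, h2, List.nil_append]

theorem pvFlatMap_ite {α β : Type} (l : List α) (p : α → Prop) [DecidablePred p]
    (F : α → List β) :
    l.flatMap (fun x => if p x then F x else []) = (l.filter (fun x => decide (p x))).flatMap F := by
  induction l with
  | nil => simp
  | cons x t ih => by_cases h : p x <;> simp [h, ih]

-- ===== VERDICT (by name: the statement is the Claim_ definition above) =====
theorem placements_for_shape_spec : Claim_equal_placements_for_shape := by
  intro shape w h_ _ hpre
  unfold Spec_placements_for_shape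
  have hxne : shape.map (fun p : Int × Int => p.1) ≠ [] := by
    simp only [ne_eq, List.map_eq_nil_iff]; exact hpre
  have hyne : shape.map (fun p : Int × Int => p.2) ≠ [] := by
    simp only [ne_eq, List.map_eq_nil_iff]; exact hpre
  obtain ⟨minx, hminx⟩ := Option.ne_none_iff_exists'.mp
    (fun hn => hxne ((PySem.List.min?_eq_none_iff (shape.map (·.1)) (fun v : Int => v)).mp hn))
  obtain ⟨maxx, hmaxx⟩ := Option.ne_none_iff_exists'.mp
    (fun hn => hxne ((PySem.List.max?_eq_none_iff (shape.map (·.1)) (fun v : Int => v)).mp hn))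
  obtain ⟨miny, hminy⟩ := Option.ne_none_iff_exists'.mp
    (fun hn => hyne ((PySem.List.min?_eq_none_iff (shape.map (·.2)) (fun v : Int => v)).mp hn))
  obtain ⟨maxy, hmaxy⟩ := Option.ne_none_iff_exists'.mp
    (fun hn => hyne ((PySem.List.max?_eq_none_iff (shape.map (·.2)) (fun v : Int => v)).mp hn))
  simp only [placements_for_shape, placements_for_shape_alt, hminx, hmaxx, hminy, hmaxy]
  -- A: one row of the outer loop
  have hrow : ∀ (out : List (List Int)), ∀ ox ∈ PySem.List.pyRange 0 (w - maxx) 1,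
      (PySem.List.pyRange 0 (h_ - maxy) 1).foldl (fun out oy =>
        match pvCellsA ox oy w h_ shape [] with
        | some cells => out ++ [PySem.Set.ofList cells]
        | none => out) out
      = out ++ (if max 0 (-minx) ≤ ox then
          (PySem.List.pyRange (max 0 (-miny)) (h_ - maxy) 1).map
            (fun oy => PySem.Set.ofList (shape.map (pvCell ox oy w)))
        else []) := by
    intro out ox hm
    obtain ⟨h0, hlt⟩ := (PySem.List.mem_pyRange_one).mp hm
    have e1 : (fun (out : List (List Int)) (oy : Int) =>
        match pvCellsA ox oy w h_ shape [] with
        | some cells => out ++ [PySem.Set.ofList cells]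
        | none => out)
      = (fun out oy => if pvOK ox oy w h_ shape then
          out ++ [PySem.Set.ofList (shape.map (pvCell ox oy w))] else out) := by
      funext out oy
      rw [pvCellsA_eq]
      by_cases h : pvOK ox oy w h_ shape = true <;> simp [h]
    rw [e1, PySem.List.foldl_append_if]
    by_cases hgood : max 0 (-minx) ≤ ox
    · have hcong : ∀ oy ∈ PySem.List.pyRange 0 (h_ - maxy) 1,
          pvOK ox oy w h_ shape = decide (max 0 (-miny) ≤ oy) := by
        intro oy hmem
        have hbm := (PySem.List.mem_pyRange_one).mp hmem
        rw [pvOK_iff shape w h_ minx maxx miny maxy ox oy hminx hmaxx hminy hmaxy hlt hbm.2]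
        have h1 : -minx ≤ ox := le_trans (le_max_right 0 (-minx)) hgood
        simp only [h1, decide_true, Bool.true_and, decide_eq_decide]
        constructor
        · intro h; exact max_le hbm.1 h
        · intro h; exact le_trans (le_max_right 0 (-miny)) h
      rw [List.filter_congr hcong,
        pvFilter_pyRange 0 (h_ - maxy) (max 0 (-miny)) (le_max_left 0 (-miny))]
      simp [hgood]
    · have hnone : (PySem.List.pyRange 0 (h_ - maxy) 1).filter
          (fun oy => pvOK ox oy w h_ shape) = [] := by
        apply List.filter_eq_nil_iff.mpr
        intro oy hmem
        have hbm := (PySem.List.mem_pyRange_one).mp hmem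
        rw [pvOK_iff shape w h_ minx maxx miny maxy ox oy hminx hmaxx hminy hmaxy hlt hbm.2]
        have hx : ¬(-minx ≤ ox) := fun hc => hgood (max_le h0 hc)
        simp [hx]
      rw [hnone]
      simp [hgood]
  -- A = canonical flatMap form
  have hA : (PySem.List.pyRange 0 (w - maxx) 1).foldl (fun out ox =>
        (PySem.List.pyRange 0 (h_ - maxy) 1).foldl (fun out oy =>
          match pvCellsA ox oy w h_ shape [] with
          | some cells => out ++ [PySem.Set.ofList cells]
          | none => out) out) []
      = (PySem.List.pyRange (max 0 (-minx)) (w - maxx) 1).flatMap (fun ox =>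
          (PySem.List.pyRange (max 0 (-miny)) (h_ - maxy) 1).map
            (fun oy => PySem.Set.ofList (shape.map (pvCell ox oy w)))) := by
    rw [PySem.List.foldl_congr_mem _ _ _ [] hrow]
    rw [PySem.List.foldl_append_eq_flatMap, List.nil_append,
      pvFlatMap_ite (PySem.List.pyRange 0 (w - maxx) 1) (fun ox => max 0 (-minx) ≤ ox),
      pvFilter_pyRange 0 (w - maxx) (max 0 (-minx)) (le_max_left 0 (-minx))]
  -- B = the same canonical form
  have hB : (PySem.List.pyRange (max 0 (-minx)) (w - maxx) 1).foldl (fun out ox =>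
        (PySem.List.pyRange (max 0 (-miny)) (h_ - maxy) 1).foldl (fun out oy =>
          out ++ [PySem.Set.ofList ((shape.map (fun p => p.2 * w + p.1)).map
            (fun p => oy * w + ox + p))]) out) []
      = (PySem.List.pyRange (max 0 (-minx)) (w - maxx) 1).flatMap (fun ox =>
          (PySem.List.pyRange (max 0 (-miny)) (h_ - maxy) 1).map
            (fun oy => PySem.Set.ofList (shape.map (pvCell ox oy w)))) := by
    have e2 : ∀ (ox oy : Int),
        (shape.map (fun p => p.2 * w + p.1)).map (fun p => oy * w + ox + p)
        = shape.map (pvCell ox oy w) := by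
      intro ox oy
      rw [List.map_map]
      congr 1
      funext p
      simp only [Function.comp, pvCell]
      ring
    have e3 : (fun (out : List (List Int)) (ox : Int) =>
        (PySem.List.pyRange (max 0 (-miny)) (h_ - maxy) 1).foldl (fun out oy =>
          out ++ [PySem.Set.ofList ((shape.map (fun p => p.2 * w + p.1)).map
            (fun p => oy * w + ox + p))]) out)
      = (fun out ox => out ++ (PySem.List.pyRange (max 0 (-miny)) (h_ - maxy) 1).map
          (fun oy => PySem.Set.ofList (shape.map (pvCell ox oy w)))) := by
      funext out ox
      rw [PySem.List.foldl_append_singleton_eq_map]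
      congr 1
      apply List.map_congr_left
      intro oy _
      rw [e2]
    rw [e3, PySem.List.foldl_append_eq_flatMap, List.nil_append]
  rw [hA, hB]
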